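-- pv_equiv track=rewrite | github.com/BruceGraham-Zoetis/QR_codes | QR_codes/qr_code_generator/qr_code_generator.py | fncMakeFileData
-- ===== SOURCE A (Python) =====
-- def fncMakeFileData(iDataLength : int):
--     iStrLen = 0
--     chChar = 'A'
--     strTestText = ""
--
--     while (iStrLen < iDataLength):
--         strTestText += chChar
--         iStrLen += 1
--         if ('Z' == chChar):
--             chChar = 'A'
--         else:
--             chChar = chr(ord(chChar) + 1)
--
--     return strTestText
-- ===== SOURCE B (Python) =====
-- def fncMakeFileData(iDataLength: int):
--     return "".join(chr(ord('A') + i % 26) for i in range(iDataLength))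
-- ===== Notes on version B (the rewrite author's own statement) =====
-- stated objective: simpler
-- what changed: Replaces the stateful while-loop (rolling character with a 'Z'->'A' reset branch and repeated string +=) by a single join over range(iDataLength) computing each character directly as chr(ord('A') + i % 26).
import Mathlib
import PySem

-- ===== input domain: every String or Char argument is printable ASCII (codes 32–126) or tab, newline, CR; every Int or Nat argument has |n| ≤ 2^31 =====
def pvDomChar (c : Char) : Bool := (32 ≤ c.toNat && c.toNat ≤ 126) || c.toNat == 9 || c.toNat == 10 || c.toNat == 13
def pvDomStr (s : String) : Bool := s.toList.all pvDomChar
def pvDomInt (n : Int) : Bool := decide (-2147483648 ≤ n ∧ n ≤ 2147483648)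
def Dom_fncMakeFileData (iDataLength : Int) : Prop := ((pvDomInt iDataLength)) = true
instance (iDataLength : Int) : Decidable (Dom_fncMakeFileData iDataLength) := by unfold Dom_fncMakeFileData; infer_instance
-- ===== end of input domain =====

-- B replaces A's stateful while-loop (rolling character, 'Z'->'A' reset branch) by a
-- direct map over the index range with modular arithmetic; objective: simpler.

-- ===== PORT A =====
-- the while-loop of A, state (iStrLen, chChar, strTestText); fuel = remaining iterations
def fncLoopA (iDataLength iStrLen : Int) (chChar : Char) (strTestText : String) : String :=
  if h : iStrLen < iDataLength then
    fncLoopA iDataLength (iStrLen + 1)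
      (if 'Z' = chChar then 'A' else Char.ofNat (chChar.toNat + 1))
      (strTestText.push chChar)
  else strTestText
termination_by (iDataLength - iStrLen).toNat
decreasing_by omega

def fncMakeFileData (iDataLength : Int) : String :=
  fncLoopA iDataLength 0 'A' ""

-- ===== PORT B =====
def fncMakeFileData_alt (iDataLength : Int) : String :=
  String.ofList ((PySem.List.pyRange 0 iDataLength 1).map
    (fun i => Char.ofNat (65 + (PySem.Int.mod i 26).toNat)))

-- ===== PRECONDITION & SPEC =====
def Spec_fncMakeFileData (iDataLength : Int) (out : String) : Prop := out = fncMakeFileData_alt iDataLength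
instance (iDataLength : Int) (out : String) : Decidable (Spec_fncMakeFileData iDataLength out) := by unfold Spec_fncMakeFileData; infer_instance

-- ===== CLAIM (what is proved, stated in full; the proofs are below) =====
def Claim_equal_fncMakeFileData : Prop := ∀ (iDataLength : Int), Dom_fncMakeFileData iDataLength → Spec_fncMakeFileData iDataLength (fncMakeFileData iDataLength)

-- ===== LEMMAS AND PROOFS =====

-- the character update of A, on a character of the form chr(65 + r) with r < 26
theorem stepChar_eq (r : Nat) (hr : r < 26) :
    (if 'Z' = Char.ofNat (65 + r) then 'A'
     else Char.ofNat ((Char.ofNat (65 + r)).toNat + 1)) = Char.ofNat (65 + (r + 1) % 26) := by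
  interval_cases r <;> decide

-- loop invariant: with k characters already produced, chChar = chr(65 + k % 26)
theorem loopA_eq (m : Nat) : ∀ (n i : Int), n - i = (m : Int) → ∀ (k : Nat) (acc : String),
    fncLoopA n i (Char.ofNat (65 + k % 26)) acc =
      acc ++ String.ofList ((List.range m).map (fun j => Char.ofNat (65 + (k + j) % 26))) := by
  induction m with
  | zero =>
    intro n i h k acc
    rw [fncLoopA]
    simp only [show ¬ i < n by omega, dif_neg, not_false_iff]
    apply String.ext
    simp
  | succ m ih =>
    intro n i h k acc
    rw [fncLoopA]
    simp only [show i < n by omega, dif_pos]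
    rw [stepChar_eq (k % 26) (Nat.mod_lt _ (by norm_num))]
    have hc : (k % 26 + 1) % 26 = (k + 1) % 26 := by omega
    rw [hc, ih n (i + 1) (by omega) (k + 1) (acc.push (Char.ofNat (65 + k % 26)))]
    apply String.ext
    simp [List.range_succ_eq_map, List.map_map, Function.comp_def, Nat.add_assoc,
      Nat.add_comm 1]

-- ===== VERDICT (by name: the statement is the Claim_ definition above) =====
theorem fncMakeFileData_spec : Claim_equal_fncMakeFileData := by
  intro n _
  unfold Spec_fncMakeFileData fncMakeFileData fncMakeFileData_alt
  by_cases hn : 0 < n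
  · have := loopA_eq (n.toNat) n 0 (by omega) 0 ""
    simp only [Nat.zero_mod, Nat.zero_add] at this
    rw [this, PySem.List.pyRange_one]
    apply String.ext
    simp only [List.map_map, String.toList_ofList, String.toList_append, String.toList_empty,
      List.nil_append, sub_zero]
    apply List.map_congr_left
    intro j hj
    simp only [Function.comp_apply, zero_add]
    congr 1
    have h26 : PySem.Int.mod (j : Int) 26 = ((j % 26 : Nat) : Int) := by
      simp
    rw [h26]
    omega
  · rw [fncLoopA, PySem.List.pyRange_one_eq_nil (by omega)]
    simp only [show ¬ (0:Int) < n by omega, dif_neg, not_false_iff, List.map_nil]
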